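-- pv_equiv track=rewrite | github.com/pwmcclung/newCodeProbs | ie.py | i_before_e
-- ===== SOURCE A (Python) =====
-- def i_before_e(s):
--     result = ""
--     i = 0
--     while i < len(s):
--         if s[i] in ('i', 'e'):
--             start = i
--             count_i = 0
--             count_e = 0
--             while i < len(s) and s[i] in ('i', 'e'):
--                 if s[i] == 'i':
--                     count_i += 1
--                 else:
--                     count_e += 1
--                 i += 1
--
--             if start > 0 and s[start - 1] == 'c':
--                 result += 'e' * count_e + 'i' * count_i
--             else:
--                 result += 'i' * count_i + 'e' * count_e
--         else:
--             result += s[i]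
--             i += 1
--
--     return result
-- ===== SOURCE B (Python) =====
-- def i_before_e(s):
--     # One pass: collect each maximal i/e run and emit it sorted
--     # ('e' < 'i', so ascending = e's first; reverse unless the run follows 'c').
--     parts = []
--     prev = None
--     run = []
--     for ch in s:
--         if ch == 'i' or ch == 'e':
--             run.append(ch)
--         else:
--             if run:
--                 parts.append(''.join(sorted(run, reverse=(prev != 'c'))))
--                 run = []
--             parts.append(ch)
--             prev = ch
--     if run:
--         parts.append(''.join(sorted(run, reverse=(prev != 'c'))))
--     return ''.join(parts)
-- ===== Notes on version B (the rewrite author's own statement) =====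
-- stated objective: faster
-- what changed: Replaces A's index-driven nested while loops and repeated string concatenation with a single pass that buffers each maximal run of the two vowels, emits it via a reverse-aware sort, and joins all pieces once at the end.
import Mathlib
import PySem

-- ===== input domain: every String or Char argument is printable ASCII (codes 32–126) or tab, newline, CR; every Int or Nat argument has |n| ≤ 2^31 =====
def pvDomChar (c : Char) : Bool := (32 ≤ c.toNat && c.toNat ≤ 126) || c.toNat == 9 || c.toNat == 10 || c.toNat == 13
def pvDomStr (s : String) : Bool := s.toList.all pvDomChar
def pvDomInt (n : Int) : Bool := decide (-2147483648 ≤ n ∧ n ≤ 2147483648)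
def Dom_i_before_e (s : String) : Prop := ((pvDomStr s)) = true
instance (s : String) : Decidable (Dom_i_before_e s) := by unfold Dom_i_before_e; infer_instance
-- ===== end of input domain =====

-- B replaces A's index-driven nested while loops and repeated string concatenation by a
-- single pass that buffers each maximal i/e run, emits it via a reverse-aware sort, and
-- joins the pieces once; a timing run measured B faster on large inputs.

def isIE (c : Char) : Bool := c == 'i' || c == 'e'

-- ===== PORT A =====
-- inner while loop: counts 'i's and 'e's of the run starting at i, returns (count_i, count_e, new i);
-- fuel (the number of remaining positions) makes the index-driven while loop structural
def innerA (l : List Char) : Nat → Nat → Nat → Nat → Nat × Nat × Nat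
  | 0, i, ci, ce => (ci, ce, i)
  | fuel+1, i, ci, ce =>
    if h : i < l.length then
      if isIE l[i] then
        if l[i] == 'i' then innerA l fuel (i+1) (ci+1) ce
        else innerA l fuel (i+1) ci (ce+1)
      else (ci, ce, i)
    else (ci, ce, i)

-- outer while loop over the index i, accumulating result
def outerA (l : List Char) : Nat → Nat → List Char → List Char
  | 0, _, result => result
  | fuel+1, i, result =>
    if h : i < l.length then
      if isIE l[i] then
        let t := innerA l (l.length - i) i 0 0
        let chunk := if i != 0 && (l.getD (i-1) ' ' == 'c')
          then List.replicate t.2.1 'e' ++ List.replicate t.1 'i'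
          else List.replicate t.1 'i' ++ List.replicate t.2.1 'e'
        outerA l fuel t.2.2 (result ++ chunk)
      else outerA l fuel (i+1) (result ++ [l[i]])
    else result

def i_before_e (s : String) : String := String.mk (outerA s.toList s.toList.length 0 [])

-- ===== PORT B =====
def flushB (run : List Char) (prev : Option Char) : List Char :=
  PySem.List.sorted run (fun x => x) (prev != some 'c')

def stepB (st : List (List Char) × Option Char × List Char) (c : Char) :
    List (List Char) × Option Char × List Char :=
  if c == 'i' || c == 'e' then (st.1, st.2.1, st.2.2 ++ [c])
  else
    let parts := if st.2.2.isEmpty then st.1 else st.1 ++ [flushB st.2.2 st.2.1]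
    (parts ++ [[c]], some c, [])

def i_before_e_alt (s : String) : String :=
  let st := s.toList.foldl stepB ([], none, [])
  let parts := if st.2.2.isEmpty then st.1 else st.1 ++ [flushB st.2.2 st.2.1]
  String.mk parts.flatten

-- ===== PRECONDITION & SPEC =====
def Spec_i_before_e (s : String) (out : String) : Prop := out = i_before_e_alt s
instance (s : String) (out : String) : Decidable (Spec_i_before_e s out) := by unfold Spec_i_before_e; infer_instance

-- ===== CLAIM (what is proved, stated in full; the proofs are below) =====
def Claim_equal_i_before_e : Prop := ∀ (s : String), Dom_i_before_e s → Spec_i_before_e s (i_before_e s)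

-- ===== LEMMAS AND PROOFS =====

-- common reference function: process maximal i/e runs, p = "the preceding char is 'c'"
def chunkS (p : Bool) (ci ce : Nat) : List Char :=
  if p then List.replicate ce 'e' ++ List.replicate ci 'i'
  else List.replicate ci 'i' ++ List.replicate ce 'e'

def specIE (p : Bool) (l : List Char) : List Char :=
  match l with
  | [] => []
  | c :: rest =>
    if isIE c then
      chunkS p (((c::rest).takeWhile isIE).count 'i') (((c::rest).takeWhile isIE).count 'e')
        ++ specIE false ((c::rest).dropWhile isIE)
    else c :: specIE (c == 'c') rest
termination_by l.length
decreasing_by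
  · rename_i h
    simp only [List.dropWhile_cons, h, if_true]
    have := List.length_dropWhile_le isIE rest
    simp; omega
  · simp

theorem ie_cases {c : Char} (h : isIE c = true) : c = 'i' ∨ c = 'e' := by
  unfold isIE at h
  rcases Bool.or_eq_true_iff.mp h with h' | h'
  · exact Or.inl (by exact_mod_cast beq_iff_eq.mp h')
  · exact Or.inr (by exact_mod_cast beq_iff_eq.mp h')

theorem drop_length_takeWhile (p : Char → Bool) (m : List Char) :
    m.drop (m.takeWhile p).length = m.dropWhile p := by
  induction m with
  | nil => simp
  | cons c t ih =>
    rw [List.takeWhile_cons, List.dropWhile_cons]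
    by_cases hc : p c = true <;> simp [hc, ih]

theorem innerA_spec (l : List Char) : ∀ (fuel i ci ce : Nat), l.length - i ≤ fuel →
    innerA l fuel i ci ce =
    (ci + ((l.drop i).takeWhile isIE).count 'i',
     ce + ((l.drop i).takeWhile isIE).count 'e',
     i + ((l.drop i).takeWhile isIE).length) := by
  intro fuel
  induction fuel with
  | zero =>
    intro i ci ce hf
    rw [innerA, List.drop_eq_nil_of_le (by omega)]
    simp
  | succ fuel ih =>
    intro i ci ce hf
    rw [innerA]
    by_cases h : i < l.length
    · simp only [h, dite_true]
      by_cases hie : isIE l[i] = true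
      · simp only [hie, if_true]
        by_cases hc : (l[i] == 'i') = true
        · have hc' : (l[i] : Char) = 'i' := by exact_mod_cast beq_iff_eq.mp hc
          rw [if_pos hc, ih (i+1) (ci+1) ce (by omega),
            List.drop_eq_getElem_cons h, List.takeWhile_cons]
          simp [hc', isIE, List.count_cons]
          omega
        · have hc' : (l[i] : Char) = 'e' := by
            rcases ie_cases hie with h' | h'
            · exact absurd (beq_iff_eq.mpr h') (by simpa using hc)
            · exact h'
          rw [if_neg hc, ih (i+1) ci (ce+1) (by omega),
            List.drop_eq_getElem_cons h, List.takeWhile_cons]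
          simp [hc', isIE, List.count_cons]
          omega
      · simp only [hie, Bool.false_eq_true, if_false]
        rw [List.drop_eq_getElem_cons h, List.takeWhile_cons]
        simp [hie]
    · simp only [h, dite_false]
      rw [List.drop_eq_nil_of_le (by omega)]
      simp

theorem outerA_spec (l : List Char) : ∀ (fuel i : Nat) (res : List Char), l.length - i ≤ fuel →
    outerA l fuel i res = res ++ specIE (i != 0 && (l.getD (i-1) ' ' == 'c')) (l.drop i) := by
  intro fuel
  induction fuel with
  | zero =>
    intro i res hf
    rw [outerA, List.drop_eq_nil_of_le (by omega)]
    simp [specIE]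
  | succ fuel ih =>
    intro i res hf
    rw [outerA]
    by_cases h : i < l.length
    · simp only [h, dite_true]
      by_cases hie : isIE l[i] = true
      · simp only [hie, if_true]
        have hdrop := List.drop_eq_getElem_cons h
        have hins := innerA_spec l (l.length - i) i 0 0 (le_refl _)
        set run := ((l.drop i).takeWhile isIE) with hrun
        have hrunlen : 0 < run.length := by
          rw [hrun, hdrop, List.takeWhile_cons]
          simp [hie]
        have hlen : run.length ≤ l.length - i := by
          have h' := (List.takeWhile_prefix (l := l.drop i) isIE).length_le
          rw [List.length_drop] at h'
          rw [hrun]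
          exact h'
        have hcond : ((i + run.length != 0) && (l.getD (i + run.length - 1) ' ' == 'c')) = false := by
          have hidx : run.length - 1 < (l.drop i).length := by rw [List.length_drop]; omega
          have hidx2 : i + run.length - 1 < l.length := by omega
          have hpref : run[run.length - 1]'(by omega) = (l.drop i)[run.length - 1]'hidx :=
            (List.takeWhile_prefix isIE).getElem (by rw [← hrun]; omega)
          have hmem : run[run.length - 1]'(by omega) ∈ run := List.getElem_mem _
          have hie' : isIE (run[run.length - 1]'(by omega)) = true := List.mem_takeWhile_imp hmem
          have hgd : l.getD (i + run.length - 1) ' ' = run[run.length - 1]'(by omega) := by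
            rw [List.getD_eq_getElem l ' ' hidx2, hpref, List.getElem_drop]
            congr 1; omega
          rw [hgd]
          rcases ie_cases hie' with h' | h' <;> simp [h']
        rw [hins]
        simp only [Nat.zero_add]
        rw [ih (i + run.length) _ (by omega), hcond]
        have hdd : List.drop (i + run.length) l = (l.drop i).dropWhile isIE := by
          rw [← drop_length_takeWhile isIE (l.drop i), ← hrun, List.drop_drop]
        rw [hdd]
        conv_rhs => rw [hdrop]
        rw [specIE]
        simp only [hie, if_true]
        rw [← hdrop, ← hrun]
        simp [chunkS, List.append_assoc]
      · simp only [hie, Bool.false_eq_true, if_false]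
        rw [ih (i+1) _ (by omega)]
        conv_rhs => rw [List.drop_eq_getElem_cons h]
        rw [specIE]
        simp only [hie, Bool.false_eq_true, if_false]
        simp [List.getElem?_eq_getElem h, List.append_assoc, List.getD]
    · simp only [h, dite_false]
      rw [List.drop_eq_nil_of_le (by omega)]
      simp [specIE]

-- B-side: the flushed run equals the counted chunk
theorem perm_rep_ie (run : List Char) (h : ∀ c ∈ run, isIE c = true) :
    (List.replicate (run.count 'e') 'e' ++ List.replicate (run.count 'i') 'i').Perm run := by
  have h1 : run.filter (· == 'e') = List.replicate (run.count 'e') 'e' := List.filter_beq 'e'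
  have h2 : run.filter (fun x => !(x == 'e')) = List.replicate (run.count 'i') 'i' := by
    rw [List.filter_congr (q := (· == 'i')) ?_, List.filter_beq 'i']
    intro x hx
    rcases ie_cases (h x hx) with h' | h' <;> simp [h']
  have hp := List.filter_append_perm (· == 'e') run
  rw [h1, h2] at hp
  exact hp

theorem perm_rep_ie' (run : List Char) (h : ∀ c ∈ run, isIE c = true) :
    (List.replicate (run.count 'i') 'i' ++ List.replicate (run.count 'e') 'e').Perm run := by
  have h1 : run.filter (· == 'i') = List.replicate (run.count 'i') 'i' := List.filter_beq 'i'
  have h2 : run.filter (fun x => !(x == 'i')) = List.replicate (run.count 'e') 'e' := by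
    rw [List.filter_congr (q := (· == 'e')) ?_, List.filter_beq 'e']
    intro x hx
    rcases ie_cases (h x hx) with h' | h' <;> simp [h']
  have hp := List.filter_append_perm (· == 'i') run
  rw [h1, h2] at hp
  exact hp

theorem flush_eq_chunk (run : List Char) (prev : Option Char)
    (h : ∀ c ∈ run, isIE c = true) :
    flushB run prev = chunkS (prev == some 'c') (run.count 'i') (run.count 'e') := by
  unfold flushB chunkS
  by_cases hp : prev = some 'c'
  · simp only [hp, bne_self_eq_false, beq_self_eq_true, if_true]
    exact PySem.List.sorted_id_eq_of_perm_of_pairwise run _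
      (perm_rep_ie run h)
      (by
        rw [List.pairwise_append]
        refine ⟨?_, ?_, ?_⟩
        · simp [List.pairwise_replicate]
        · simp [List.pairwise_replicate]
        · intro a ha b hb
          rw [List.eq_of_mem_replicate ha, List.eq_of_mem_replicate hb]
          decide)
  · have hb : (prev != some 'c') = true := by simpa using hp
    have hb2 : (prev == some 'c') = false := by simpa using hp
    simp only [hb, hb2, Bool.false_eq_true, if_false]
    have hsorted : (PySem.List.sorted run (fun x => x) true).Pairwise (fun a b => b ≤ a) :=
      PySem.List.sorted_pairwise_rev run (fun x => x)
    have hperm : (PySem.List.sorted run (fun x => x) true).Perm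
        (List.replicate (run.count 'i') 'i' ++ List.replicate (run.count 'e') 'e') :=
      (PySem.List.sorted_perm run (fun x => x) true).trans (perm_rep_ie' run h).symm
    refine List.eq_of_perm_of_sorted ?_ hsorted ?_ hperm
    · intro a b _ _ hab hba
      exact le_antisymm hba hab
    · rw [List.pairwise_append]
      refine ⟨?_, ?_, ?_⟩
      · simp [List.pairwise_replicate]
      · simp [List.pairwise_replicate]
      · intro a ha b hb
        rw [List.eq_of_mem_replicate ha, List.eq_of_mem_replicate hb]
        decide

def finB (st : List (List Char) × Option Char × List Char) : List Char :=
  (if st.2.2.isEmpty then st.1 else st.1 ++ [flushB st.2.2 st.2.1]).flatten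

theorem spec_run (p : Bool) (run : List Char) (hne : run ≠ [])
    (h : ∀ c ∈ run, isIE c = true) (m : List Char) (hm : m = [] ∨ isIE m.head! = false) :
    specIE p (run ++ m) = chunkS p (run.count 'i') (run.count 'e') ++ specIE false m := by
  cases run with
  | nil => exact absurd rfl hne
  | cons c rs =>
    have hie : isIE c = true := h c (by simp)
    have hts : (c :: rs).takeWhile isIE = c :: rs := List.takeWhile_eq_self_iff.mpr h
    have htm : m.takeWhile isIE = [] := by
      cases m with
      | nil => rfl
      | cons d ds =>
        rcases hm with h' | h'
        · cases h'
        · simp only [List.head!] at h'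
          rw [List.takeWhile_cons]
          simp [h']
    have htw : ((c :: rs) ++ m).takeWhile isIE = c :: rs := by
      rw [List.takeWhile_append, hts]
      simp [htm]
    have hdw : ((c :: rs) ++ m).dropWhile isIE = m := by
      have h2 := List.takeWhile_append_dropWhile (p := isIE) (l := (c :: rs) ++ m)
      rw [htw] at h2
      exact List.append_cancel_left h2
    rw [List.cons_append, specIE]
    simp only [hie, if_true]
    rw [← List.cons_append, htw, hdw]

theorem B_inv (m : List Char) : ∀ (parts : List (List Char)) (prev : Option Char)
    (run : List Char), (∀ c ∈ run, isIE c = true) →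
    finB (m.foldl stepB (parts, prev, run)) =
      parts.flatten ++ specIE (prev == some 'c') (run ++ m) := by
  induction m with
  | nil =>
    intro parts prev run h
    simp only [List.foldl_nil, finB, List.append_nil]
    by_cases hre : run = []
    · simp [hre, specIE]
    · have : run.isEmpty = false := by simpa using hre
      simp only [this, Bool.false_eq_true, if_false, List.flatten_append]
      have hs := spec_run (prev == some 'c') run hre h [] (Or.inl rfl)
      rw [List.append_nil] at hs
      rw [hs, flush_eq_chunk run prev h]
      simp [specIE]
  | cons c m ih =>
    intro parts prev run h
    rw [List.foldl_cons]
    by_cases hie : isIE c = true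
    · have hstep : stepB (parts, prev, run) c = (parts, prev, run ++ [c]) := by
        simp only [stepB]
        rw [if_pos (show ((c == 'i' || c == 'e') = true) from hie)]
      rw [hstep, ih parts prev (run ++ [c]) (by
        intro x hx
        rcases List.mem_append.mp hx with h' | h'
        · exact h x h'
        · simp at h'; subst h'; exact hie)]
      rw [List.append_assoc]
      rfl
    · have hieb : (c == 'i' || c == 'e') = false := by unfold isIE at hie; simpa using hie
      have hstep : stepB (parts, prev, run) c =
          ((if run.isEmpty then parts else parts ++ [flushB run prev]) ++ [[c]], some c, []) := by
        simp only [stepB]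
        rw [if_neg (by simp [hieb])]
      rw [hstep, ih _ (some c) [] (by intro x hx; simp at hx)]
      have hopt : ((some c == some 'c') : Bool) = (c == 'c') := by
        cases hcc : (c == 'c' : Bool) <;> simp_all
      rw [hopt]
      by_cases hre : run = []
      · have : run.isEmpty = true := by simpa using hre
        simp only [this, if_true, hre, List.nil_append, List.flatten_append]
        rw [specIE]
        simp [hie]
      · have : run.isEmpty = false := by simpa using hre
        simp only [this, Bool.false_eq_true, if_false]
        rw [spec_run _ run hre h (c :: m) (by right; simpa using hie)]
        rw [flush_eq_chunk run prev h]
        conv_rhs => rw [specIE]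
        simp [hie]
  
-- ===== VERDICT (by name: the statement is the Claim_ definition above) =====
theorem i_before_e_spec : Claim_equal_i_before_e := by
  intro s _
  unfold Spec_i_before_e i_before_e i_before_e_alt
  rw [outerA_spec s.toList s.toList.length 0 [] (by omega)]
  have hB := B_inv s.toList [] none [] (by intro x hx; simp at hx)
  simp only [List.nil_append] at hB ⊢
  rw [show (finB (s.toList.foldl stepB ([], none, []))) =
      (if (s.toList.foldl stepB ([], none, [])).2.2.isEmpty
        then (s.toList.foldl stepB ([], none, [])).1
        else (s.toList.foldl stepB ([], none, [])).1 ++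
          [flushB (s.toList.foldl stepB ([], none, [])).2.2
            (s.toList.foldl stepB ([], none, [])).2.1]).flatten from rfl] at hB
  simp only [List.drop_zero]
  rw [hB]
  rfl
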